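-- pv_equiv track=rewrite | github.com/swosu/SwosuCsPythonExamples | Discrete_Structures/Ch06/long_example_solution/scripts/turn_orders.py | default_names
-- ===== SOURCE A (Python) =====
-- def default_names(T: int):
--     # A, B, C, ... then A1, B1... if we run out
--     base = [chr(ord('A') + i) for i in range(min(T, 26))]
--     if T <= 26:
--         return base
--     names = base[:]
--     i = 1
--     while len(names) < T:
--         for ch in base:
--             names.append(f"{ch}{i}")
--             if len(names) >= T:
--                 break
--         i += 1
--     return names
-- ===== SOURCE B (Python) =====
-- def default_names(T: int):
--     # name of position k computed directly: k = 26*q + r -> letter chr(ord('A')+r), suffix q (empty when q == 0)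
--     def name(k):
--         q, r = divmod(k, 26)
--         letter = chr(ord('A') + r)
--         return letter if q == 0 else f"{letter}{q}"
--     return [name(k) for k in range(T)]
-- ===== Notes on version B (the rewrite author's own statement) =====
-- stated objective: simpler
-- what changed: Replaces A's two-phase build (26 singles, then a while/for loop growing the list with a running suffix counter and length-checked break) by a single comprehension over range(T) that computes each name independently from its index via divmod(k, 26).
import Mathlib
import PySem

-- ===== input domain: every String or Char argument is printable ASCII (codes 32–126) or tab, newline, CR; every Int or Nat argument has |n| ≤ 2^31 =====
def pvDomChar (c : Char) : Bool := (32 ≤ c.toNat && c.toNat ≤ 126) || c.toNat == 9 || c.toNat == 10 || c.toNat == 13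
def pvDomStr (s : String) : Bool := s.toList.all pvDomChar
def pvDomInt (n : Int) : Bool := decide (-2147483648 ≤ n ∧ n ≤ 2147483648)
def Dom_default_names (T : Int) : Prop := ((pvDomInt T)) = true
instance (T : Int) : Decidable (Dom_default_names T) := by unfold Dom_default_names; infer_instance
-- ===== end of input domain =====

-- B replaces A's two-phase build (base list, then while/for with a running suffix counter and
-- break) by computing each name independently from its index via divmod; objective: simpler.

-- ===== PORT A =====
-- chr(ord('A') + i); A only evaluates it on 0 ≤ i ≤ 25, where it is exact
def chrA (i : Int) : String := String.ofList [Char.ofNat (65 + i.toNat)]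

-- the inner 'for ch in base: names.append(f"{ch}{i}"); if len(names) >= T: break'
def innerA (T : Int) (base : List String) (names : List String) (i : Int) : List String :=
  match base with
  | [] => names
  | ch :: rest =>
    let names' := names ++ [ch ++ PySem.Int.toStr i]
    if T ≤ (names'.length : Int) then names' else innerA T rest names' i

-- the outer 'while len(names) < T' loop; fuel only makes it total: each iteration appends at
-- least one name (base has 26 elements when the loop runs), so T.toNat iterations suffice
def loopA (fuel : Nat) (T : Int) (base : List String) (names : List String) (i : Int) :
    List String :=
  match fuel with
  | 0 => names
  | Nat.succ f =>
    if (names.length : Int) < T then loopA f T base (innerA T base names i) (i + 1)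
    else names

def default_names (T : Int) : List String :=
  let base := (PySem.List.pyRange 0 (min T 26) 1).map chrA
  if T ≤ 26 then base
  else loopA T.toNat T base base 1

-- ===== PORT B =====
-- name(k): q, r = divmod(k, 26); letter = chr(ord('A') + r); letter if q == 0 else f"{letter}{q}"
def nameB (k : Int) : String :=
  let q := PySem.Int.floordiv k 26
  let r := PySem.Int.mod k 26
  let letter := String.ofList [Char.ofNat (65 + r.toNat)]
  if q = 0 then letter else letter ++ PySem.Int.toStr q

def default_names_alt (T : Int) : List String :=
  (PySem.List.pyRange 0 T 1).map nameB

-- ===== PRECONDITION & SPEC =====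
def Spec_default_names (T : Int) (out : List String) : Prop := out = default_names_alt T
instance (T : Int) (out : List String) : Decidable (Spec_default_names T out) := by unfold Spec_default_names; infer_instance

-- ===== CLAIM (what is proved, stated in full; the proofs are below) =====
def Claim_equal_default_names : Prop := ∀ (T : Int), Dom_default_names T → Spec_default_names T (default_names T)

-- ===== LEMMAS AND PROOFS =====

-- B's output truncated at n, the shape every invariant below is about
def bNames (n : Int) : List String := (PySem.List.pyRange 0 n 1).map nameB

lemma bNames_length (n : Int) : (bNames n).length = n.toNat := by
  simp [bNames, PySem.List.length_pyRange_one]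

lemma bNames_succ (n : Int) (h : 0 ≤ n) : bNames (n + 1) = bNames n ++ [nameB n] := by
  unfold bNames
  rw [PySem.List.pyRange_one_succ_right h, List.map_append, List.map_singleton]

lemma nameB_small (k : Int) (h0 : 0 ≤ k) (h1 : k < 26) : nameB k = chrA k := by
  have hq : PySem.Int.floordiv k 26 = 0 := by
    rw [PySem.Int.floordiv_eq_iff_of_pos (by omega)]; omega
  have hr : PySem.Int.mod k 26 = k := by
    have := PySem.Int.floordiv_mul_add_mod k 26
    omega
  simp only [nameB, hq, hr, chrA]
  simp

lemma nameB_big (i j : Int) (hi : 1 ≤ i) (h0 : 0 ≤ j) (h1 : j < 26) :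
    nameB (26 * i + j) = chrA j ++ PySem.Int.toStr i := by
  have hq : PySem.Int.floordiv (26 * i + j) 26 = i := by
    rw [PySem.Int.floordiv_eq_iff_of_pos (by omega)]
    constructor <;> nlinarith
  have hr : PySem.Int.mod (26 * i + j) 26 = j := by
    have := PySem.Int.floordiv_mul_add_mod (26 * i + j) 26
    rw [hq] at this; omega
  have hne : i ≠ 0 := by omega
  simp only [nameB, hq, hr, chrA]
  rw [if_neg hne]

lemma inner_spec (T : Int) : ∀ (m : Nat) (i : Int), (m : Int) ≤ 26 → 1 ≤ i →
    26 * i + (26 - (m : Int)) < T →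
    innerA T ((PySem.List.pyRange (26 - (m : Int)) 26 1).map chrA)
      (bNames (26 * i + (26 - (m : Int)))) i = bNames (min T (26 * i + 26)) := by
  intro m
  induction m with
  | zero =>
    intro i _ hi hlt
    rw [PySem.List.pyRange_one_eq_nil (by omega)]
    simp only [List.map_nil, innerA]
    congr 1
    omega
  | succ m ih =>
    intro i hm hi hlt
    set j : Int := 26 - ((m : Int) + 1) with hj
    have hj0 : 0 ≤ j := by omega
    have hj26 : j < 26 := by omega
    rw [show (26 : Int) - ((m : Nat) + 1 : Nat) = j by push_cast; omega,
        PySem.List.pyRange_one_cons (by omega : j < 26)]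
    simp only [List.map_cons, innerA]
    have hstep : bNames (26 * i + j) ++ [chrA j ++ PySem.Int.toStr i]
        = bNames (26 * i + j + 1) := by
      rw [← nameB_big i j hi hj0 hj26, ← bNames_succ _ (by omega)]
    rw [hstep, bNames_length]
    have hcast : ((26 * i + j + 1).toNat : Int) = 26 * i + j + 1 := by omega
    by_cases hbr : T ≤ ((26 * i + j + 1).toNat : Int)
    · rw [if_pos hbr]
      congr 1
      omega
    · rw [if_neg hbr]
      have := ih i (by omega) hi (by omega)
      rw [show (26 : Int) - (m : Int) = j + 1 by omega] at this
      rw [show 26 * i + j + 1 = 26 * i + (j + 1) by ring, this]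

lemma loop_spec (T : Int) (hT : 26 < T) : ∀ (fuel : Nat) (i : Int), 1 ≤ i →
    T ≤ 26 * i + 26 * (fuel : Int) →
    loopA fuel T ((PySem.List.pyRange 0 26 1).map chrA) (bNames (min T (26 * i))) i
      = bNames T := by
  intro fuel
  induction fuel with
  | zero =>
    intro i hi hfuel
    have hmin : min T (26 * i) = T := by omega
    rw [hmin]
    rfl
  | succ f ih =>
    intro i hi hfuel
    by_cases hlt : 26 * i < T
    · have hmin : min T (26 * i) = 26 * i := by omega
      rw [hmin]
      simp only [loopA, bNames_length]
      rw [if_pos (by omega)]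
      have hin := inner_spec T 26 i (by omega) hi (by norm_num; omega)
      norm_num at hin
      rw [hin]
      have := ih (i + 1) (by omega) (by push_cast at hfuel; omega)
      rw [show 26 * (i + 1) = 26 * i + 26 by ring] at this
      exact this
    · have hmin : min T (26 * i) = T := by omega
      rw [hmin]
      simp only [loopA, bNames_length]
      rw [if_neg (by omega)]

-- ===== VERDICT (by name: the statement is the Claim_ definition above) =====
theorem default_names_spec : Claim_equal_default_names := by
  intro T _
  unfold Spec_default_names default_names
  by_cases hT : T ≤ 26
  · rw [if_pos hT]
    have hmin : min T 26 = T := by omega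
    rw [hmin]
    show (PySem.List.pyRange 0 T 1).map chrA = default_names_alt T
    unfold default_names_alt
    apply List.map_congr_left
    intro k hk
    rw [PySem.List.mem_pyRange_one] at hk
    exact (nameB_small k hk.1 (by omega)).symm
  · rw [if_neg hT]
    have hmin : min T 26 = 26 := by omega
    rw [hmin]
    have hbase : (PySem.List.pyRange 0 26 1).map chrA = bNames 26 := by
      unfold bNames
      apply List.map_congr_left
      intro k hk
      rw [PySem.List.mem_pyRange_one] at hk
      exact (nameB_small k hk.1 hk.2).symm
    have h26 : bNames 26 = bNames (min T (26 * 1)) := by congr 1; omega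
    have hloop := loop_spec T (by omega) T.toNat 1 le_rfl (by omega)
    rw [← h26, ← hbase] at hloop
    exact hloop
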